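-- pv_equiv track=rewrite | github.com/rockgarden-build/rockgarden | src/rockgarden/obsidian/inline_tags.py | expand_hierarchical_tags
-- ===== SOURCE A (Python) =====
-- def expand_hierarchical_tags(tags: list[str]) -> list[str]:
--     """Expand nested tags into all ancestor segments.
--
--     ["project/active", "python"] → ["project/active", "project", "python"]
--     ["a/b/c"] → ["a/b/c", "a/b", "a"]
--     """
--     expanded: set[str] = set()
--     for tag in tags:
--         expanded.add(tag)
--         parts = tag.split("/")
--         for i in range(1, len(parts)):
--             expanded.add("/".join(parts[:i]))
--     return sorted(expanded)
-- ===== SOURCE B (Python) =====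
-- def expand_hierarchical_tags(tags: list[str]) -> list[str]:
--     """Expand nested tags into all ancestor segments.
--
--     Walks each tag's hierarchy by repeatedly trimming the last '/'-segment
--     (via rfind) instead of splitting and re-joining parts lists.
--     """
--     expanded: set[str] = set()
--     for tag in tags:
--         expanded.add(tag)
--         t = tag
--         while True:
--             i = t.rfind("/")
--             if i == -1:
--                 break
--             t = t[:i]
--             expanded.add(t)
--     return sorted(expanded)
-- ===== Notes on version B (the rewrite author's own statement) =====
-- stated objective: alternative
-- what changed: B walks each tag's ancestor chain by repeatedly trimming at the last '/' found with rfind, instead of splitting the tag into a parts list and re-joining every prefix of it.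
import Mathlib
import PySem

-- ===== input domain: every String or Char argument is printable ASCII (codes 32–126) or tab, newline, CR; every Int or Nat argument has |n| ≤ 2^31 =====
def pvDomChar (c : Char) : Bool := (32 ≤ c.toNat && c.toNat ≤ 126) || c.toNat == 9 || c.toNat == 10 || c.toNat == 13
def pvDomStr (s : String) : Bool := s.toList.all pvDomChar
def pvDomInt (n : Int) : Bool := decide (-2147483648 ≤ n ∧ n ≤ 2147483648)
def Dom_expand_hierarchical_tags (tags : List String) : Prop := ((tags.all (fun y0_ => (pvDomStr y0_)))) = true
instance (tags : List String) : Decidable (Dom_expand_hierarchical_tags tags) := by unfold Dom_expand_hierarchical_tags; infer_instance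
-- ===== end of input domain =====

-- B walks each tag's ancestor chain by trimming at the last '/' (rfind) instead of split/join of prefixes; return value only.

-- ===== PORT A =====
def expand_hierarchical_tags (tags : List String) : List String :=
  let expanded : PySem.Set String := tags.foldl (fun ex tag =>
    let ex := ex.add tag
    -- tag.split("/"): sep "/" is a nonempty literal, so split? is always `some`; getD [] is a totality guard
    let parts := (PySem.Str.split? tag "/").getD []
    (PySem.List.pyRange 1 (parts.length : Int) 1).foldl
      (fun ex i => ex.add (PySem.Str.join "/" (PySem.List.slice parts none (some i)))) ex)
    PySem.Set.empty
  PySem.List.sorted expanded (fun x => x) false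

-- ===== PORT B =====
-- the `while True: i = t.rfind("/"); if i == -1: break; t = t[:i]; expanded.add(t)` loop;
-- fuel = len t + 1 is a totality guard only (each step strictly shortens t)
def trimGoB (fuel : Nat) (ex : PySem.Set String) (t : String) : PySem.Set String :=
  match fuel with
  | 0 => ex
  | fuel + 1 =>
    let i := PySem.Str.rfind t "/"
    if i = -1 then ex
    else
      let t' := PySem.Str.slice t none (some i)
      trimGoB fuel (ex.add t') t'

def expand_hierarchical_tags_alt (tags : List String) : List String :=
  let expanded : PySem.Set String := tags.foldl
    (fun ex tag => trimGoB (tag.toList.length + 1) (ex.add tag) tag) PySem.Set.empty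
  PySem.List.sorted expanded (fun x => x) false

-- ===== PRECONDITION & SPEC =====
def Spec_expand_hierarchical_tags (tags : List String) (out : List String) : Prop := out = expand_hierarchical_tags_alt tags
instance (tags : List String) (out : List String) : Decidable (Spec_expand_hierarchical_tags tags out) := by unfold Spec_expand_hierarchical_tags; infer_instance

-- ===== CLAIM (what is proved, stated in full; the proofs are below) =====
def Claim_equal_expand_hierarchical_tags : Prop := ∀ (tags : List String), Dom_expand_hierarchical_tags tags → Spec_expand_hierarchical_tags tags (expand_hierarchical_tags tags)

-- ===== LEMMAS AND PROOFS =====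

def splitSimple (pre : List Char) : List Char → List (List Char)
  | [] => [pre]
  | c :: rest => if c = '/' then pre :: splitSimple [] rest else splitSimple (pre ++ [c]) rest

def Pc (cs : List Char) (x : String) : Prop :=
  ∃ j : Nat, ∃ _ : j < cs.length, cs[j] = '/' ∧ x = String.ofList (cs.take j)

theorem go_eq : ∀ (fuel : Nat) (l cur : List Char) (acc : List (List Char)), l.length < fuel →
    PySem.Chars.splitOn.go ['/'] fuel l cur acc = acc.reverse ++ splitSimple cur.reverse l := by
  intro fuel
  induction fuel with
  | zero => intro l cur acc h; omega
  | succ n ih =>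
    intro l cur acc h
    cases l with
    | nil => simp [PySem.Chars.splitOn.go, splitSimple]
    | cons c rest =>
      simp only [PySem.Chars.splitOn.go]
      by_cases hc : c = '/'
      · subst hc
        rw [if_pos (by simp [List.isPrefixOf])]
        rw [ih _ _ _ (by simpa using Nat.lt_of_succ_lt_succ h)]
        simp [splitSimple]
      · rw [if_neg (by simp [List.isPrefixOf, Ne.symm hc])]
        rw [ih _ _ _ (by simpa using Nat.lt_of_succ_lt_succ h)]
        simp [splitSimple, hc]

theorem splitOn_eq (cs : List Char) : PySem.Chars.splitOn cs ['/'] = splitSimple [] cs := by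
  have := go_eq (cs.length + 1) cs [] [] (by omega)
  simpa [PySem.Chars.splitOn] using this

theorem splitSimple_ne_nil (pre cs : List Char) : splitSimple pre cs ≠ [] := by
  induction cs generalizing pre with
  | nil => simp [splitSimple]
  | cons c rest ih => by_cases hc : c = '/' <;> simp [splitSimple, hc, ih]

theorem join_cons_ne_nil (sep p : List Char) (ps : List (List Char)) (h : ps ≠ []) :
    PySem.Chars.join sep (p :: ps) = p ++ sep ++ PySem.Chars.join sep ps := by
  cases ps with
  | nil => exact absurd rfl h
  | cons q rest => exact PySem.Chars.join_cons_cons sep p q rest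

theorem join_splitSimple (cs pre : List Char) :
    PySem.Chars.join ['/'] (splitSimple pre cs) = pre ++ cs := by
  induction cs generalizing pre with
  | nil => simp [splitSimple, PySem.Chars.join_singleton]
  | cons c rest ih =>
    by_cases hc : c = '/'
    · subst hc
      rw [show splitSimple pre ('/' :: rest) = pre :: splitSimple [] rest by simp [splitSimple]]
      rw [join_cons_ne_nil _ _ _ (splitSimple_ne_nil _ _), ih]
      simp
    · rw [show splitSimple pre (c :: rest) = splitSimple (pre ++ [c]) rest by simp [splitSimple, hc]]
      rw [ih]; simp

theorem splitSimple_no_slash (cs : List Char) (h : '/' ∉ cs) (pre : List Char) :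
    splitSimple pre cs = [pre ++ cs] := by
  induction cs generalizing pre with
  | nil => simp [splitSimple]
  | cons c rest ih =>
    have hc : c ≠ '/' := fun e => h (e ▸ List.mem_cons_self ..)
    rw [show splitSimple pre (c :: rest) = splitSimple (pre ++ [c]) rest by simp [splitSimple, hc]]
    rw [ih (fun m => h (List.mem_cons_of_mem _ m))]
    simp

theorem splitSimple_append (u v : List Char) (hv : '/' ∉ v) (pre : List Char) :
    splitSimple pre (u ++ '/' :: v) = splitSimple pre u ++ [v] := by
  induction u generalizing pre with
  | nil =>
    simp [splitSimple, splitSimple_no_slash v hv]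
  | cons c u' ih =>
    by_cases hc : c = '/'
    · subst hc; simp [splitSimple, ih]
    · simp [splitSimple, hc, ih]

theorem lastSlash (cs : List Char) (h : '/' ∈ cs) :
    ∃ u v, cs = u ++ '/' :: v ∧ '/' ∉ v := by
  induction cs with
  | nil => cases h
  | cons c rest ih =>
    by_cases hr : '/' ∈ rest
    · obtain ⟨u, v, huv, hv⟩ := ih hr
      exact ⟨c :: u, v, by simp [huv], hv⟩
    · have hc : c = '/' := by rcases List.mem_cons.1 h with h' | h'; exact h'.symm; exact absurd h' hr
      exact ⟨[], rest, by simp [hc], hr⟩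

theorem rfind_go_none (cs : List Char) (h : '/' ∉ cs) :
    ∀ j : Nat, PySem.Chars.rfind.go cs ['/'] j = -1 := by
  intro j
  induction j with
  | zero =>
    simp only [PySem.Chars.rfind.go]
    rw [if_neg]
    intro hp
    cases cs with
    | nil => simp [List.isPrefixOf] at hp
    | cons c r =>
      simp [List.isPrefixOf] at hp
      cases hp
      exact h (List.mem_cons_self ..)
  | succ n ih =>
    simp only [PySem.Chars.rfind.go]
    rw [if_neg, ih]
    intro hp
    cases hd : List.drop (n+1) cs with
    | nil => simp [hd] at hp
    | cons c r =>
      rw [hd] at hp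
      simp [List.isPrefixOf] at hp
      cases hp
      have : '/' ∈ List.drop (n+1) cs := by rw [hd]; exact List.mem_cons_self ..
      exact h (List.mem_of_mem_drop this)

theorem rfind_none (cs : List Char) (h : '/' ∉ cs) : PySem.Chars.rfind cs ['/'] = -1 :=
  rfind_go_none cs h _

theorem rfind_go_base (cs v : List Char) (u : List Char) (hcs : cs = u ++ '/' :: v) :
    PySem.Chars.rfind.go cs ['/'] u.length = (u.length : Int) := by
  cases hu : u.length with
  | zero =>
    have : cs = '/' :: v := by cases u with | nil => simpa using hcs | cons a b => simp at hu
    simp [PySem.Chars.rfind.go, this, List.isPrefixOf]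
  | succ n =>
    simp only [PySem.Chars.rfind.go]
    have hpre : (['/'].isPrefixOf (List.drop (n+1) cs)) = true := by
      rw [hcs, show n + 1 = u.length from hu.symm, List.drop_left]
      simp [List.isPrefixOf]
    rw [if_pos hpre]

theorem rfind_go_step (cs u v : List Char) (hcs : cs = u ++ '/' :: v) (hv : '/' ∉ v) :
    ∀ d : Nat, u.length + d ≤ cs.length →
      PySem.Chars.rfind.go cs ['/'] (u.length + d) = (u.length : Int) := by
  intro d
  induction d with
  | zero => intro _; simpa using rfind_go_base cs v u hcs
  | succ n ih =>
    intro hle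
    have hdrop : List.drop (u.length + n + 1) cs = List.drop n v := by
      rw [hcs, show u.length + n + 1 = u.length + (n + 1) by omega]
      simp [List.drop_append]
    have hnp : ¬ (['/'].isPrefixOf (List.drop (u.length + n + 1) cs) = true) := by
      intro hp
      rw [hdrop] at hp
      cases hdn : List.drop n v with
      | nil => rw [hdn] at hp; simp [List.isPrefixOf] at hp
      | cons c r =>
        rw [hdn] at hp
        simp [List.isPrefixOf] at hp
        cases hp
        have : '/' ∈ List.drop n v := by rw [hdn]; exact List.mem_cons_self ..
        exact hv (List.mem_of_mem_drop this)
    rw [show u.length + (n + 1) = (u.length + n) + 1 by omega]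
    simp only [PySem.Chars.rfind.go]
    rw [if_neg hnp]
    exact ih (by omega)

theorem rfind_last (u v : List Char) (hv : '/' ∉ v) :
    PySem.Chars.rfind (u ++ '/' :: v) ['/'] = (u.length : Int) := by
  have := rfind_go_step (u ++ '/' :: v) u v rfl hv (v.length + 1) (by simp)
  simpa [PySem.Chars.rfind, Nat.add_assoc] using this

theorem Pc_no_slash (cs : List Char) (h : '/' ∉ cs) (x : String) : ¬ Pc cs x := by
  rintro ⟨j, hj, hsl, _⟩
  exact h (hsl ▸ List.getElem_mem hj)

theorem Pc_decomp (u v : List Char) (hv : '/' ∉ v) (x : String) :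
    Pc (u ++ '/' :: v) x ↔ Pc u x ∨ x = String.ofList u := by
  constructor
  · rintro ⟨j, hj, hsl, hx⟩
    rcases lt_trichotomy j u.length with hlt | heq | hgt
    · left
      refine ⟨j, hlt, ?_, ?_⟩
      · rw [List.getElem_append_left hlt] at hsl; exact hsl
      · rw [List.take_append_of_le_length (le_of_lt hlt)] at hx; exact hx
    · right
      rw [hx, heq, List.take_left]
    · exfalso
      have h1 : j - u.length < ('/' :: v).length := by simp at hj ⊢; omega
      rw [List.getElem_append_right (by omega)] at hsl
      have h2 : 1 ≤ j - u.length := by omega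
      obtain ⟨m, hm⟩ := Nat.exists_eq_add_of_le h2
      have hm' : j - u.length = m + 1 := by omega
      simp only [hm', List.getElem_cons_succ] at hsl
      exact hv (hsl ▸ List.getElem_mem _)
  · rintro (⟨j, hj, hsl, hx⟩ | hx)
    · refine ⟨j, by simp; omega, ?_, ?_⟩
      · rw [List.getElem_append_left hj]; exact hsl
      · rw [List.take_append_of_le_length (le_of_lt hj)]; exact hx
    · refine ⟨u.length, by simp, ?_, ?_⟩
      · rw [List.getElem_append_right (le_refl _)]; simp
      · rw [List.take_left]; exact hx

theorem crux : ∀ (n : Nat) (cs : List Char), cs.length ≤ n → ∀ (x : String),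
    (∃ k : Nat, 1 ≤ k ∧ k < (splitSimple [] cs).length ∧
       x = String.ofList (PySem.Chars.join ['/'] ((splitSimple [] cs).take k))) ↔ Pc cs x := by
  intro n
  induction n with
  | zero =>
    intro cs hlen x
    have : cs = [] := List.eq_nil_of_length_eq_zero (Nat.le_zero.1 hlen)
    subst this
    simp [splitSimple, Pc]
  | succ n ih =>
    intro cs hlen x
    by_cases hs : '/' ∈ cs
    · obtain ⟨u, v, hcs, hv⟩ := lastSlash cs hs
      subst hcs
      rw [splitSimple_append u v hv []]
      have hL : 1 ≤ (splitSimple [] u).length :=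
        List.length_pos_of_ne_nil (splitSimple_ne_nil [] u)
      rw [Pc_decomp u v hv x]
      rw [← ih u (by simp at hlen; omega) x]
      constructor
      · rintro ⟨k, hk1, hk2, hx⟩
        simp at hk2
        rcases Nat.lt_or_ge k (splitSimple [] u).length with hlt | hge
        · left
          refine ⟨k, hk1, hlt, ?_⟩
          rwa [List.take_append_of_le_length (le_of_lt hlt)] at hx
        · right
          have hkeq : k = (splitSimple [] u).length := by omega
          rw [hkeq, List.take_left] at hx
          rw [hx, join_splitSimple]
          simp
      · rintro (⟨k, hk1, hk2, hx⟩ | hx)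
        · refine ⟨k, hk1, by simp; omega, ?_⟩
          rwa [List.take_append_of_le_length (le_of_lt hk2)]
        · refine ⟨(splitSimple [] u).length, hL, by simp, ?_⟩
          rw [List.take_left, join_splitSimple]
          simpa using hx
    · rw [splitSimple_no_slash cs hs []]
      simp only [List.length_singleton]
      constructor
      · rintro ⟨k, hk1, hk2, _⟩; omega
      · intro h; exact absurd h (Pc_no_slash cs hs x)

theorem mem_foldl_add {α β : Type} [BEq α] [LawfulBEq α] (f : β → α) :
    ∀ (xs : List β) (ex : PySem.Set α) (x : α),
    (x ∈ xs.foldl (fun s i => PySem.Set.add s (f i)) ex ↔ x ∈ ex ∨ ∃ i ∈ xs, x = f i) := by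
  intro xs
  induction xs with
  | nil => intro ex x; simp
  | cons a rest ih =>
    intro ex x
    simp only [List.foldl_cons, ih, PySem.Set.mem_add]
    constructor
    · rintro ((h | h) | ⟨i, hi, hx⟩)
      · exact Or.inl h
      · exact Or.inr ⟨a, List.mem_cons_self .., h⟩
      · exact Or.inr ⟨i, List.mem_cons_of_mem _ hi, hx⟩
    · rintro (h | ⟨i, hi, hx⟩)
      · exact Or.inl (Or.inl h)
      · rcases List.mem_cons.1 hi with rfl | hi'
        · exact Or.inl (Or.inr hx)
        · exact Or.inr ⟨i, hi', hx⟩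

theorem nodup_foldl_add {α β : Type} [BEq α] [LawfulBEq α] (f : β → α) :
    ∀ (xs : List β) (ex : PySem.Set α), ex.Nodup →
    (xs.foldl (fun s i => PySem.Set.add s (f i)) ex).Nodup := by
  intro xs
  induction xs with
  | nil => intro ex h; simpa using h
  | cons a rest ih =>
    intro ex h
    exact ih _ (PySem.Set.nodup_add ex (f a) h)

theorem parts_eq (tag : String) :
    (PySem.Str.split? tag "/").getD [] = (splitSimple [] tag.toList).map String.ofList := by
  simp [PySem.Str.split?, PySem.Chars.split?, show String.toList "/" = ['/'] from rfl,
    show (['/'] : List Char).isEmpty = false from rfl, splitOn_eq]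

theorem memA (tag : String) (ex : PySem.Set String) (x : String) :
    (x ∈ (PySem.List.pyRange 1 (((PySem.Str.split? tag "/").getD []).length : Int) 1).foldl
      (fun ex i => ex.add (PySem.Str.join "/" (PySem.List.slice ((PySem.Str.split? tag "/").getD []) none (some i)))) (ex.add tag)
     ↔ x ∈ ex ∨ x = tag ∨ Pc tag.toList x) := by
  rw [mem_foldl_add (fun i => PySem.Str.join "/" (PySem.List.slice ((PySem.Str.split? tag "/").getD []) none (some i)))]
  rw [PySem.Set.mem_add]
  constructor
  · rintro (h | ⟨i, hi, hx⟩)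
    · tauto
    · right; right
      rw [PySem.List.mem_pyRange_one] at hi
      obtain ⟨h1, h2⟩ := hi
      have hk : ∃ k : Nat, i = (k : Int) := ⟨i.toNat, (Int.toNat_of_nonneg (by omega)).symm⟩
      obtain ⟨k, rfl⟩ := hk
      rw [← crux tag.toList.length tag.toList (le_refl _) x]
      refine ⟨k, by exact_mod_cast h1, ?_, ?_⟩
      · rw [parts_eq] at h2; simpa using h2
      · rw [parts_eq] at hx
        rw [PySem.List.slice_to_natCast, ← List.map_take] at hx
        rw [hx, PySem.Str.join]
        simp [PySem.Chars.join, show String.toList "/" = ['/'] from rfl, Function.comp_def, String.toList_ofList]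
  · rintro (h | h | h)
    · tauto
    · tauto
    · right
      rw [← crux tag.toList.length tag.toList (le_refl _) x] at h
      obtain ⟨k, hk1, hk2, hx⟩ := h
      refine ⟨(k : Int), ?_, ?_⟩
      · rw [PySem.List.mem_pyRange_one, parts_eq]
        constructor
        · exact_mod_cast hk1
        · simp; exact_mod_cast hk2
      · rw [parts_eq, PySem.List.slice_to_natCast, ← List.map_take, hx, PySem.Str.join]
        simp [PySem.Chars.join, show String.toList "/" = ['/'] from rfl, Function.comp_def, String.toList_ofList]

theorem memB : ∀ (n : Nat) (t : String) (ex : PySem.Set String) (x : String),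
    t.toList.length < n →
    (x ∈ trimGoB n ex t ↔ x ∈ ex ∨ Pc t.toList x) := by
  intro n
  induction n with
  | zero => intro t ex x h; omega
  | succ n ih =>
    intro t ex x h
    by_cases hs : '/' ∈ t.toList
    · obtain ⟨u, v, hcs, hv⟩ := lastSlash t.toList hs
      have hrf : PySem.Str.rfind t "/" = (u.length : Int) := by
        rw [PySem.Str.rfind_eq, show String.toList "/" = ['/'] from rfl, hcs]
        exact rfind_last u v hv
      have hne : (u.length : Int) ≠ -1 := by omega
      simp only [trimGoB, hrf, if_neg hne]
      have htl : (PySem.Str.slice t none (some (u.length : Int))).toList = u := by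
        rw [PySem.Str.toList_slice, PySem.Chars.slice_eq_listSlice, PySem.List.slice_to_natCast,
          hcs, List.take_left]
      have hlen : u.length < n := by
        have : t.toList.length = u.length + v.length + 1 := by rw [hcs]; simp; omega
        omega
      rw [ih _ _ x (by rw [htl]; exact hlen)]
      rw [PySem.Set.mem_add, htl, hcs, Pc_decomp u v hv x]
      have hofl : PySem.Str.slice t none (some (u.length : Int)) = String.ofList u :=
        (String.ofList_toList (s := PySem.Str.slice t none (some (u.length : Int)))).symm.trans
          (by rw [htl])
      rw [hofl]
      tauto
    · have hrf : PySem.Str.rfind t "/" = -1 := by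
        rw [PySem.Str.rfind_eq, show String.toList "/" = ['/'] from rfl]
        exact rfind_none _ hs
      simp only [trimGoB, hrf, if_true]
      have := Pc_no_slash t.toList hs x
      tauto

theorem nodupB : ∀ (n : Nat) (t : String) (ex : PySem.Set String), ex.Nodup →
    (trimGoB n ex t).Nodup := by
  intro n
  induction n with
  | zero => intro t ex h; simpa [trimGoB] using h
  | succ n ih =>
    intro t ex h
    simp only [trimGoB]
    split
    · exact h
    · exact ih _ _ (PySem.Set.nodup_add _ _ h)

def tagSpec (tags : List String) (x : String) : Prop :=
  ∃ t ∈ tags, x = t ∨ Pc t.toList x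

theorem memOuterA : ∀ (tags : List String) (ex : PySem.Set String) (x : String),
    (x ∈ tags.foldl (fun ex tag =>
      let ex := ex.add tag
      let parts := (PySem.Str.split? tag "/").getD []
      (PySem.List.pyRange 1 (parts.length : Int) 1).foldl
        (fun ex i => ex.add (PySem.Str.join "/" (PySem.List.slice parts none (some i)))) ex) ex
     ↔ x ∈ ex ∨ tagSpec tags x) := by
  intro tags
  induction tags with
  | nil => intro ex x; simp [tagSpec]
  | cons tag rest ih =>
    intro ex x
    simp only [List.foldl_cons, ih, memA, tagSpec]
    constructor
    · rintro ((h | h | h) | ⟨t, ht, hx⟩)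
      · exact Or.inl h
      · exact Or.inr ⟨tag, List.mem_cons_self .., Or.inl h⟩
      · exact Or.inr ⟨tag, List.mem_cons_self .., Or.inr h⟩
      · exact Or.inr ⟨t, List.mem_cons_of_mem _ ht, hx⟩
    · rintro (h | ⟨t, ht, hx⟩)
      · exact Or.inl (Or.inl h)
      · rcases List.mem_cons.1 ht with rfl | ht'
        · rcases hx with hx | hx
          · exact Or.inl (Or.inr (Or.inl hx))
          · exact Or.inl (Or.inr (Or.inr hx))
        · exact Or.inr ⟨t, ht', hx⟩

theorem memOuterB : ∀ (tags : List String) (ex : PySem.Set String) (x : String),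
    (x ∈ tags.foldl (fun ex tag => trimGoB (tag.toList.length + 1) (ex.add tag) tag) ex
     ↔ x ∈ ex ∨ tagSpec tags x) := by
  intro tags
  induction tags with
  | nil => intro ex x; simp [tagSpec]
  | cons tag rest ih =>
    intro ex x
    simp only [List.foldl_cons, ih]
    rw [memB (tag.toList.length + 1) tag (ex.add tag) x (by omega), PySem.Set.mem_add]
    simp only [tagSpec]
    constructor
    · rintro ((((h | h) | h)) | ⟨t, ht, hx⟩)
      · exact Or.inl h
      · exact Or.inr ⟨tag, List.mem_cons_self .., Or.inl h⟩
      · exact Or.inr ⟨tag, List.mem_cons_self .., Or.inr h⟩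
      · exact Or.inr ⟨t, List.mem_cons_of_mem _ ht, hx⟩
    · rintro (h | ⟨t, ht, hx⟩)
      · exact Or.inl (Or.inl (Or.inl h))
      · rcases List.mem_cons.1 ht with rfl | ht'
        · rcases hx with hx | hx
          · exact Or.inl (Or.inl (Or.inr hx))
          · exact Or.inl (Or.inr hx)
        · exact Or.inr ⟨t, ht', hx⟩

theorem nodupOuterA : ∀ (tags : List String) (ex : PySem.Set String), ex.Nodup →
    (tags.foldl (fun ex tag =>
      let ex := ex.add tag
      let parts := (PySem.Str.split? tag "/").getD []
      (PySem.List.pyRange 1 (parts.length : Int) 1).foldl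
        (fun ex i => ex.add (PySem.Str.join "/" (PySem.List.slice parts none (some i)))) ex) ex).Nodup := by
  intro tags
  induction tags with
  | nil => intro ex h; simpa using h
  | cons tag rest ih =>
    intro ex h
    exact ih _ (nodup_foldl_add _ _ _ (PySem.Set.nodup_add _ _ h))

theorem nodupOuterB : ∀ (tags : List String) (ex : PySem.Set String), ex.Nodup →
    (tags.foldl (fun ex tag => trimGoB (tag.toList.length + 1) (ex.add tag) tag) ex).Nodup := by
  intro tags
  induction tags with
  | nil => intro ex h; simpa using h
  | cons tag rest ih =>
    intro ex h
    exact ih _ (nodupB _ _ _ (PySem.Set.nodup_add _ _ h))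

theorem ports_agree : ∀ (tags : List String),
    expand_hierarchical_tags tags = expand_hierarchical_tags_alt tags := by
  intro tags
  unfold expand_hierarchical_tags expand_hierarchical_tags_alt
  rw [PySem.List.sorted_id_eq_sorted_id_iff_perm]
  rw [List.perm_ext_iff_of_nodup
    (nodupOuterA tags PySem.Set.empty List.nodup_nil)
    (nodupOuterB tags PySem.Set.empty List.nodup_nil)]
  intro x
  rw [memOuterA, memOuterB]

-- ===== VERDICT (by name: the statement is the Claim_ definition above) =====
theorem expand_hierarchical_tags_spec : Claim_equal_expand_hierarchical_tags := by
  intro tags _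
  unfold Spec_expand_hierarchical_tags
  exact ports_agree tags
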